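-- pv_equiv track=rewrite | github.com/giciriri/customizableLoadBalancer | addserver.py | aggregate_by_server
-- ===== SOURCE A (Python) =====
-- def aggregate_by_server(distribution):
--     server_counts = {}
--     for virtual_server, count in distribution.items():
--         real_server = virtual_server.split('_')[0]
--         if real_server in server_counts:
--             server_counts[real_server] += count
--         else:
--             server_counts[real_server] = count
--     return server_counts
-- ===== SOURCE B (Python) =====
-- def aggregate_by_server(distribution):
--     # One pass to tag each count with its real-server prefix, then a grouped
--     # comprehension: one entry per distinct prefix (first-occurrence order),
--     # each summing its group's counts.
--     pairs = [(virtual_server.split('_')[0], count)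
--              for virtual_server, count in distribution.items()]
--     return {real_server: sum(c for p, c in pairs if p == real_server)
--             for real_server in dict.fromkeys(p for p, _ in pairs)}
-- ===== Notes on version B (the rewrite author's own statement) =====
-- stated objective: alternative
-- what changed: Replaces A's incremental dict-update loop (membership test, then += or fresh insert per item) with a map to (prefix, count) pairs followed by a grouped dict comprehension over the ordered-deduplicated prefixes, each entry summing its group's counts in a separate scan.
import Mathlib
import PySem

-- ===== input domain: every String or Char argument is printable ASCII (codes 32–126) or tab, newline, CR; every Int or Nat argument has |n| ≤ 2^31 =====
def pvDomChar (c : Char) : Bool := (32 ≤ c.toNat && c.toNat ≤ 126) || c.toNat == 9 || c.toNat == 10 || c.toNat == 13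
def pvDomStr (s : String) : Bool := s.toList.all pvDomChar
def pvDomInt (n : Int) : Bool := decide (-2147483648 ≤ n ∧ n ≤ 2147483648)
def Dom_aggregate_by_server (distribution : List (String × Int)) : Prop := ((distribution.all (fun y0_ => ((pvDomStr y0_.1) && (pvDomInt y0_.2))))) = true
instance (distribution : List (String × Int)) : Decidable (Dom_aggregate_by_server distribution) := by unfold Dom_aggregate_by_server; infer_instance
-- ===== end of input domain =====

-- B replaces A's incremental dict-update loop with a map to (prefix, count) pairs
-- and a grouped comprehension over the deduplicated prefixes (alternative decomposition).


-- ===== PORT A =====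
-- virtual_server.split('_')[0]: split with a nonempty separator is never empty, so [0] is its head.
def pvPrefix (s : String) : String := ((PySem.Str.split? s "_").getD []).headD ""

def aggregate_by_server (distribution : List (String × Int)) : List (String × Int) :=
  (distribution.foldl
    (fun server_counts kv =>
      let real_server := pvPrefix kv.1
      if server_counts.contains real_server then
        server_counts.modify real_server 0 (· + kv.2)   -- server_counts[real_server] += count
      else
        server_counts.insert real_server kv.2)
    PySem.Dict.empty).items

-- ===== PORT B =====
def aggregate_by_server_alt (distribution : List (String × Int)) : List (String × Int) :=
  let pairs := distribution.map (fun kv => (pvPrefix kv.1, kv.2))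
  (PySem.List.dedup (pairs.map (·.1))).map
    (fun real_server => (real_server, ((pairs.filter (fun pc => pc.1 == real_server)).map (·.2)).sum))

-- ===== PRECONDITION & SPEC =====
def Spec_aggregate_by_server (distribution : List (String × Int)) (out : List (String × Int)) : Prop := out = aggregate_by_server_alt distribution
instance (distribution : List (String × Int)) (out : List (String × Int)) : Decidable (Spec_aggregate_by_server distribution out) := by unfold Spec_aggregate_by_server; infer_instance

-- ===== CLAIM (what is proved, stated in full; the proofs are below) =====
def Claim_equal_aggregate_by_server : Prop := ∀ (distribution : List (String × Int)), Dom_aggregate_by_server distribution → Spec_aggregate_by_server distribution (aggregate_by_server distribution)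

-- ===== LEMMAS AND PROOFS =====

-- A's branch is a single Dict.modify: when the key is absent, modify inserts f(0) = 0 + c = c.
theorem pvStepEqModify (d : PySem.Dict String Int) (k : String) (c : Int) :
    (if d.contains k then d.modify k 0 (· + c) else d.insert k c) = d.modify k 0 (· + c) := by
  cases h : d.contains k
  · simp [PySem.Dict.modify, PySem.Dict.getD_of_not_contains (h := h)]
  · simp [PySem.Dict.modify]

-- getD of a modify-accumulate loop: running sum over the matching group.
theorem pvGetDFoldlModify (l : List (String × Int)) (d : PySem.Dict String Int) (v : String) :
    (l.foldl (fun d kv => d.modify (pvPrefix kv.1) 0 (· + kv.2)) d).getD v 0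
      = d.getD v 0 + ((l.filter (fun kv => pvPrefix kv.1 == v)).map (·.2)).sum := by
  induction l generalizing d with
  | nil => simp
  | cons kv rest ih =>
    by_cases hk : pvPrefix kv.1 = v
    · simp [List.foldl_cons, ih, hk, add_assoc]
    · simp [List.foldl_cons, ih, PySem.Dict.getD_modify, Ne.symm hk, hk]

theorem aggregate_by_server_eq (distribution : List (String × Int)) :
    aggregate_by_server distribution = aggregate_by_server_alt distribution := by
  unfold aggregate_by_server aggregate_by_server_alt
  have hfun : (fun (server_counts : PySem.Dict String Int) (kv : String × Int) =>
      let real_server := pvPrefix kv.1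
      if server_counts.contains real_server then
        server_counts.modify real_server 0 (· + kv.2)
      else
        server_counts.insert real_server kv.2)
      = fun d kv => d.modify (pvPrefix kv.1) 0 (· + kv.2) := by
    funext d kv; exact pvStepEqModify d (pvPrefix kv.1) kv.2
  rw [hfun]
  have hnd : (distribution.foldl (fun d kv => d.modify (pvPrefix kv.1) 0 (· + kv.2))
      PySem.Dict.empty).keys.Nodup :=
    PySem.Dict.nodup_keys_foldl_modify_key distribution (fun kv => pvPrefix kv.1)
      0 (fun _ kv => (· + kv.2)) PySem.Dict.empty PySem.Dict.nodup_keys_empty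
  rw [PySem.Dict.items_eq_map_keys _ hnd 0]
  rw [PySem.Dict.keys_foldl_modify_key]
  simp only [PySem.Dict.keys_empty, PySem.Set.update_nil_left, PySem.List.dedup_eq_ofList,
    List.map_map]
  refine List.map_congr_left ?_
  intro v hv
  rw [pvGetDFoldlModify]
  simp [List.filter_map, Function.comp_def]

-- ===== VERDICT (by name: the statement is the Claim_ definition above) =====
theorem aggregate_by_server_spec : Claim_equal_aggregate_by_server := by
  intro distribution _
  unfold Spec_aggregate_by_server
  exact aggregate_by_server_eq distribution
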